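-- pv_equiv track=rewrite | github.com/pareronia/codyssi | src/main/codyssi18.py | solve
-- ===== SOURCE A (Python) =====
-- Item = tuple[int, int, int]
--
-- def solve(items: list[Item], target: int) -> int:
--     dp = [[(0, 0)] * (target + 1) for _ in range(len(items) + 1)]
--     for i, item in enumerate(items, start=1):
--         qual, cost, mat = item
--         for j in range(target + 1):
--             if cost <= j:
--                 prev = dp[i - 1][j - cost]
--                 dp[i][j] = max(
--                     dp[i - 1][j],
--                     (prev[0] + qual, prev[1] - mat),
--                 )
--             else:
--                 dp[i][j] = dp[i - 1][j]
--     best = []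
--     j = target
--     for i in range(len(items), 0, -1):
--         if dp[i][j] != dp[i - 1][j]:
--             best.append(items[i - 1])
--             j -= items[i - 1][1]
--     return sum(q for q, _, _ in best) * sum(m for _, _, m in best)
-- ===== SOURCE B (Python) =====
-- def solve(items, target):
--     dp = [(0, 0)] * (target + 1)
--     for qual, cost, mat in items:
--         for j in range(target, cost - 1, -1):
--             prev = dp[j - cost]
--             dp[j] = max(dp[j], (prev[0] + qual, prev[1] - mat))
--     return dp[target][0] * -dp[target][1]
-- ===== Notes on version B (the rewrite author's own statement) =====
-- stated objective: simpler
-- what changed: Replaced the (n+1)x(target+1) table plus O(n) backtracking reconstruction pass with a single 1D row of (quality,-material) pairs updated in place by a downward sweep, reading quality*material directly off dp[target] with no reconstruction.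
-- outside the precondition, e.g. on solve([], -1): A returns 0, B raises IndexError
import Mathlib
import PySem

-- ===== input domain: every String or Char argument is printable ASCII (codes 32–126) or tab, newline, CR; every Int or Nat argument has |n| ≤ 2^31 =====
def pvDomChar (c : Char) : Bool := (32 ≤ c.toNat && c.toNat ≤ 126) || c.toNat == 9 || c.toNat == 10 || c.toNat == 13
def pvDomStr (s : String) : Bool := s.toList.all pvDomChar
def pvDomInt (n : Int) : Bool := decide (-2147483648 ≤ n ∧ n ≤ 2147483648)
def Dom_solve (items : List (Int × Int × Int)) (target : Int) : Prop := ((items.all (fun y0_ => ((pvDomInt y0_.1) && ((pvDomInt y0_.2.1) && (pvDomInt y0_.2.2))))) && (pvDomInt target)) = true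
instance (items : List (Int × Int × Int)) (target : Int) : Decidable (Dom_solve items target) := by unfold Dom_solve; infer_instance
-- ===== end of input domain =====

-- B keeps one 1D row of (quality, -material) pairs updated by a downward sweep and reads the
-- answer off dp[target] directly, instead of A's full 2D table plus a backtracking pass. (simpler)

-- Python's max on two (int,int) tuples: lexicographic, first argument wins ties.
def pvLtP (a b : Int × Int) : Bool := a.1 < b.1 || (a.1 == b.1 && a.2 < b.2)
def pvMaxP (a b : Int × Int) : Int × Int := if pvLtP a b then b else a

-- ===== PORT A =====
-- Python's row i is a list assigned cell by cell in order, reading only row i-1; ported as the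
-- array built by pushing those cells in the same order (exact). Arrays mirror Python lists' O(1)
-- indexing; all reads are in range on every input Pre_ admits.
def pvRowAArr (prev : Array (Int × Int)) (target : Int) (item : Int × Int × Int) : Array (Int × Int) :=
  (PySem.List.pyRange 0 (target + 1) 1).foldl
    (fun arr j =>
      arr.push
        (if item.2.1 ≤ j then
          let p := prev.getD (j - item.2.1).toNat (0, 0)
          pvMaxP (prev.getD j.toNat (0, 0)) (p.1 + item.1, p.2 - item.2.2)
        else prev.getD j.toNat (0, 0))) #[]

-- A preallocates the table and overwrites row i in order; rows > i stay untouched zeros until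
-- written, so after i iterations the table is exactly the list of rows built so far (exact).
def solve (items : List (Int × Int × Int)) (target : Int) : Int :=
  let tab := items.foldl
    (fun tab item => tab ++ [pvRowAArr (tab.getLastD #[]) target item])
    [Array.replicate (target + 1).toNat ((0 : Int), (0 : Int))]
  let fin := (PySem.List.pyRange (items.length : Int) 0 (-1)).foldl
    (fun (st : List (Int × Int × Int) × Int) i =>
      if (PySem.List.pyGetD tab i #[]).getD st.2.toNat (0, 0) ≠
          (PySem.List.pyGetD tab (i - 1) #[]).getD st.2.toNat (0, 0) then
        (st.1 ++ [PySem.List.pyGetD items (i - 1) (0, 0, 0)],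
         st.2 - (PySem.List.pyGetD items (i - 1) (0, 0, 0)).2.1)
      else st) ([], target)
  (fin.1.map (·.1)).foldl (· + ·) 0 * (fin.1.map (·.2.2)).foldl (· + ·) 0

-- ===== PORT B =====
def solve_alt (items : List (Int × Int × Int)) (target : Int) : Int :=
  let dp := items.foldl
    (fun dp item =>
      (PySem.List.pyRange target (item.2.1 - 1) (-1)).foldl
        (fun (dp : Array (Int × Int)) j =>
          let p := dp.getD (j - item.2.1).toNat (0, 0)
          dp.setIfInBounds j.toNat
            (pvMaxP (dp.getD j.toNat (0, 0)) (p.1 + item.1, p.2 - item.2.2)))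
        dp)
    (Array.replicate (target + 1).toNat ((0 : Int), (0 : Int)))
  (dp.getD target.toNat (0, 0)).1 * -(dp.getD target.toNat (0, 0)).2

-- ===== PRECONDITION & SPEC =====
-- Pre_ excludes negative targets and negative costs, on which A raises IndexError — except the
-- single corner items = [] with target < 0, where A returns 0 (no loop runs) while B's own
-- dp[target] lookup raises IndexError, so that corner is excluded too.
def Pre_solve (items : List (Int × Int × Int)) (target : Int) : Prop :=
  0 ≤ target ∧ ∀ it ∈ items, 0 ≤ it.2.1
instance (items : List (Int × Int × Int)) (target : Int) : Decidable (Pre_solve items target) := by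
  unfold Pre_solve; infer_instance
def pvWitness_solve : (List (Int × Int × Int)) × Int := ([(5, 2, 3), (4, 1, 2)], 3)

def Spec_solve (items : List (Int × Int × Int)) (target : Int) (out : Int) : Prop := out = solve_alt items target
instance (items : List (Int × Int × Int)) (target : Int) (out : Int) : Decidable (Spec_solve items target out) := by unfold Spec_solve; infer_instance

-- ===== CLAIM (what is proved, stated in full; the proofs are below) =====
def Claim_equal_solve : Prop := ∀ (items : List (Int × Int × Int)) (target : Int), Dom_solve items target → Pre_solve items target → Spec_solve items target (solve items target)

-- ===== LEMMAS AND PROOFS =====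

-- the list-level model of A's inner loop, used only by the proofs
def pvRowA (prev : List (Int × Int)) (target : Int) (item : Int × Int × Int) : List (Int × Int) :=
  (PySem.List.pyRange 0 (target + 1) 1).map (fun j =>
    if item.2.1 ≤ j then
      let p := PySem.List.pyGetD prev (j - item.2.1) (0, 0)
      pvMaxP (PySem.List.pyGetD prev j (0, 0)) (p.1 + item.1, p.2 - item.2.2)
    else PySem.List.pyGetD prev j (0, 0))

-- abbreviation used only by the proofs: the DP row after the first i items
def pvRow (items : List (Int × Int × Int)) (target : Int) : List (Int × Int) :=
  items.foldl (fun r it => pvRowA r target it) (List.replicate (target + 1).toNat ((0 : Int), (0 : Int)))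

theorem pvRowA_length (prev : List (Int × Int)) (t : Int) (it : Int × Int × Int) :
    (pvRowA prev t it).length = (t + 1).toNat := by
  simp [pvRowA, PySem.List.length_pyRange_one]

theorem pvRowA_get (prev : List (Int × Int)) (t : Int) (it : Int × Int × Int)
    (j : Int) (h0 : 0 ≤ j) (h1 : j < t + 1) :
    PySem.List.pyGetD (pvRowA prev t it) j (0, 0) =
      if it.2.1 ≤ j then
        pvMaxP (PySem.List.pyGetD prev j (0, 0))
          ((PySem.List.pyGetD prev (j - it.2.1) (0, 0)).1 + it.1,
           (PySem.List.pyGetD prev (j - it.2.1) (0, 0)).2 - it.2.2)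
      else PySem.List.pyGetD prev j (0, 0) := by
  rw [pvRowA, PySem.List.pyGetD_map_pyRange_of_nonneg _ _ _ _ h0 (by omega)]

theorem pvListEq (t : Int) (ht : 0 ≤ t) (xs ys : List (Int × Int))
    (hx : xs.length = (t + 1).toNat) (hy : ys.length = (t + 1).toNat)
    (h : ∀ j : Int, 0 ≤ j → j ≤ t →
      PySem.List.pyGetD xs j (0, 0) = PySem.List.pyGetD ys j (0, 0)) : xs = ys := by
  apply List.ext_getElem (by omega)
  intro n hn hn'
  have hh := h n (Int.natCast_nonneg n) (by omega)
  rw [PySem.List.pyGetD_eq_getElem xs _ (Int.natCast_nonneg n) (by omega),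
      PySem.List.pyGetD_eq_getElem ys _ (Int.natCast_nonneg n) (by omega)] at hh
  simpa using hh

theorem pvGetSet_eq (dp : List (Int × Int)) (k : Int) (v : Int × Int)
    (hk : 0 ≤ k) (hklen : k.toNat < dp.length) :
    PySem.List.pyGetD (PySem.List.pySetD dp k v) k (0, 0) = v := by
  rw [PySem.List.pySetD_of_nonneg dp v hk]
  rw [PySem.List.pyGetD_eq_getElem _ _ hk (by simp; omega)]
  simp

theorem pvGetSet_ne (dp : List (Int × Int)) (k j : Int) (v : Int × Int)
    (hk : 0 ≤ k) (hj : 0 ≤ j) (hne : j ≠ k) (hjlen : j.toNat < dp.length) :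
    PySem.List.pyGetD (PySem.List.pySetD dp k v) j (0, 0) = PySem.List.pyGetD dp j (0, 0) := by
  rw [PySem.List.pySetD_of_nonneg dp v hk]
  rw [PySem.List.pyGetD_eq_getElem _ _ hj (by simp; omega),
      PySem.List.pyGetD_eq_getElem _ _ hj (by omega)]
  rw [List.getElem_set]
  simp only [if_neg (by omega : ¬ k.toNat = j.toNat)]

theorem pvSweep_inv (t : Int) (ht : 0 ≤ t) (it : Int × Int × Int) (hc : 0 ≤ it.2.1)
    (old : List (Int × Int)) :
    ∀ (fuel : Nat) (k : Int), k ≤ t → (k - (it.2.1 - 1)).toNat ≤ fuel →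
    ∀ dp : List (Int × Int), dp.length = (t + 1).toNat →
    (∀ j : Int, 0 ≤ j → j ≤ k →
      PySem.List.pyGetD dp j (0, 0) = PySem.List.pyGetD old j (0, 0)) →
    (∀ j : Int, k < j → j ≤ t →
      PySem.List.pyGetD dp j (0, 0) = PySem.List.pyGetD (pvRowA old t it) j (0, 0)) →
    ((PySem.List.pyRange k (it.2.1 - 1) (-1)).foldl
        (fun dp j =>
          let p := PySem.List.pyGetD dp (j - it.2.1) (0, 0)
          PySem.List.pySetD dp j
            (pvMaxP (PySem.List.pyGetD dp j (0, 0)) (p.1 + it.1, p.2 - it.2.2)))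
        dp).length = (t + 1).toNat ∧
    (∀ j : Int, 0 ≤ j → j ≤ t →
      PySem.List.pyGetD
        ((PySem.List.pyRange k (it.2.1 - 1) (-1)).foldl
          (fun dp j =>
            let p := PySem.List.pyGetD dp (j - it.2.1) (0, 0)
            PySem.List.pySetD dp j
              (pvMaxP (PySem.List.pyGetD dp j (0, 0)) (p.1 + it.1, p.2 - it.2.2)))
          dp) j (0, 0) = PySem.List.pyGetD (pvRowA old t it) j (0, 0)) := by
  intro fuel
  induction fuel with
  | zero =>
    intro k hk hfuel dp hlen h1 h2
    have hk' : k ≤ it.2.1 - 1 := by omega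
    rw [PySem.List.pyRange_neg_one_eq_nil hk', List.foldl_nil]
    refine ⟨hlen, fun j hj0 hjt => ?_⟩
    by_cases hjk : j ≤ k
    · rw [h1 j hj0 hjk, pvRowA_get old t it j hj0 (by omega)]
      rw [if_neg (by omega)]
    · exact h2 j (by omega) hjt
  | succ fuel ih =>
    intro k hk hfuel dp hlen h1 h2
    by_cases hk' : k ≤ it.2.1 - 1
    · rw [PySem.List.pyRange_neg_one_eq_nil hk', List.foldl_nil]
      refine ⟨hlen, fun j hj0 hjt => ?_⟩
      by_cases hjk : j ≤ k
      · rw [h1 j hj0 hjk, pvRowA_get old t it j hj0 (by omega)]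
        rw [if_neg (by omega)]
      · exact h2 j (by omega) hjt
    · have hck : it.2.1 ≤ k := by omega
      have hk0 : 0 ≤ k := le_trans hc hck
      rw [PySem.List.pyRange_neg_one_cons (by omega : it.2.1 - 1 < k), List.foldl_cons]
      simp only []
      set v := pvMaxP (PySem.List.pyGetD dp k (0, 0))
        ((PySem.List.pyGetD dp (k - it.2.1) (0, 0)).1 + it.1,
         (PySem.List.pyGetD dp (k - it.2.1) (0, 0)).2 - it.2.2) with hv
      have hvval : v = PySem.List.pyGetD (pvRowA old t it) k (0, 0) := by
        rw [hv, h1 k hk0 le_rfl, h1 (k - it.2.1) (by omega) (by omega),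
            pvRowA_get old t it k hk0 (by omega), if_pos hck]
      have hlen' : (PySem.List.pySetD dp k v).length = (t + 1).toNat := by
        rw [PySem.List.pySetD_of_nonneg dp v hk0, List.length_set, hlen]
      refine ih (k - 1) (by omega) (by omega) _ hlen' ?_ ?_
      · intro j hj0 hjk
        rw [pvGetSet_ne dp k j v hk0 hj0 (by omega) (by rw [hlen]; omega)]
        exact h1 j hj0 (by omega)
      · intro j hjk hjt
        by_cases hjeq : j = k
        · subst hjeq
          rw [pvGetSet_eq dp j v hk0 (by rw [hlen]; omega)]
          exact hvval
        · rw [pvGetSet_ne dp k j v hk0 (by omega) hjeq (by rw [hlen]; omega)]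
          exact h2 j (by omega) hjt

-- the downward in-place sweep computes exactly pvRowA
theorem pvSweep_eq (t : Int) (ht : 0 ≤ t) (it : Int × Int × Int) (hc : 0 ≤ it.2.1)
    (dp : List (Int × Int)) (hlen : dp.length = (t + 1).toNat) :
    (PySem.List.pyRange t (it.2.1 - 1) (-1)).foldl
        (fun dp j =>
          let p := PySem.List.pyGetD dp (j - it.2.1) (0, 0)
          PySem.List.pySetD dp j
            (pvMaxP (PySem.List.pyGetD dp j (0, 0)) (p.1 + it.1, p.2 - it.2.2)))
        dp = pvRowA dp t it := by
  have main := pvSweep_inv t ht it hc dp ((t - (it.2.1 - 1)).toNat) t le_rfl le_rfl dp hlen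
    (fun _ _ _ => rfl) (fun j hj hj' => absurd hj (by omega))
  obtain ⟨hl, hg⟩ := main
  exact pvListEq t ht _ _ hl (by rw [pvRowA_length]) hg

theorem pvFold_sweep (target : Int) (ht : 0 ≤ target) :
    ∀ (items : List (Int × Int × Int)) (dp : List (Int × Int)),
      (∀ it ∈ items, 0 ≤ it.2.1) → dp.length = (target + 1).toNat →
      items.foldl
        (fun dp item =>
          (PySem.List.pyRange target (item.2.1 - 1) (-1)).foldl
            (fun dp j =>
              let p := PySem.List.pyGetD dp (j - item.2.1) (0, 0)
              PySem.List.pySetD dp j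
                (pvMaxP (PySem.List.pyGetD dp j (0, 0)) (p.1 + item.1, p.2 - item.2.2)))
            dp)
        dp = items.foldl (fun r it => pvRowA r target it) dp := by
  intro items
  induction items with
  | nil => intro dp _ _; rfl
  | cons it its ih =>
    intro dp hc hlen
    rw [List.foldl_cons, List.foldl_cons,
        pvSweep_eq target ht it (hc it (List.mem_cons_self)) dp hlen]
    exact ih (pvRowA dp target it) (fun x hx => hc x (List.mem_cons_of_mem _ hx))
      (pvRowA_length dp target it)

theorem scanl_getElem? {α β : Type} (g : β → α → β) (l : List α) (b : β) (i : Nat)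
    (h : i ≤ l.length) : (List.scanl g b l)[i]? = some (l.take i |>.foldl g b) := by
  induction l generalizing b i with
  | nil =>
    obtain rfl : i = 0 := Nat.le_zero.mp (by simpa using h)
    simp [List.scanl]
  | cons x l ih =>
    rw [List.scanl_cons]
    cases i with
    | zero => simp
    | succ i => simpa using ih (g b x) i (by simpa using h)

theorem pvGetD_toNat (xs : List (Int × Int)) (i : Int) (d : Int × Int) (h : 0 ≤ i) :
    xs.getD i.toNat d = PySem.List.pyGetD xs i d := by
  simp [PySem.List.pyGetD, PySem.List.pyGet?_of_nonneg xs h, List.getD_eq_getElem?_getD]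

theorem pvArrGet (a : Array (Int × Int)) (i : Int) (d : Int × Int) (h : 0 ≤ i) :
    a.getD i.toNat d = PySem.List.pyGetD a.toList i d := by
  rw [← pvGetD_toNat _ _ _ h]
  simp [Array.getD_eq_getD_getElem?, List.getD_eq_getElem?_getD, ← Array.getElem?_toList]

theorem pvPushFold (l : List Int) (g : Int → (Int × Int)) (arr : Array (Int × Int)) :
    (l.foldl (fun a j => a.push (g j)) arr).toList = arr.toList ++ l.map g := by
  induction l generalizing arr with
  | nil => simp
  | cons x xs ih =>
    rw [List.foldl_cons, ih (arr.push (g x)), Array.toList_push, List.map_cons, List.append_assoc]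
    rfl

theorem pvRowAArr_toList (prev : Array (Int × Int)) (t : Int) (it : Int × Int × Int) :
    (pvRowAArr prev t it).toList = pvRowA prev.toList t it := by
  unfold pvRowAArr pvRowA
  rw [pvPushFold]
  simp only [List.nil_append]
  apply List.map_congr_left
  intro j hj
  have hj' := (PySem.List.mem_pyRange_one).mp hj
  by_cases hcj : it.2.1 ≤ j
  · rw [if_pos hcj, if_pos hcj, pvArrGet prev (j - it.2.1) _ (by omega),
        pvArrGet prev j _ (by omega)]
  · rw [if_neg hcj, if_neg hcj, pvArrGet prev j _ (by omega)]

theorem pvFoldRows_toList (target : Int) (l : List (Int × Int × Int)) :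
    ∀ arr : Array (Int × Int),
      (l.foldl (fun r it => pvRowAArr r target it) arr).toList =
        l.foldl (fun r it => pvRowA r target it) arr.toList := by
  induction l with
  | nil => intro arr; rfl
  | cons it its ih =>
    intro arr
    rw [List.foldl_cons, List.foldl_cons, ih, pvRowAArr_toList]

theorem pvSweepArr_toList (target : Int) (it : Int × Int × Int) (hc : 0 ≤ it.2.1) :
    ∀ dp : Array (Int × Int),
    ((PySem.List.pyRange target (it.2.1 - 1) (-1)).foldl
        (fun (dp : Array (Int × Int)) j =>
          let p := dp.getD (j - it.2.1).toNat (0, 0)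
          dp.setIfInBounds j.toNat
            (pvMaxP (dp.getD j.toNat (0, 0)) (p.1 + it.1, p.2 - it.2.2)))
        dp).toList =
      (PySem.List.pyRange target (it.2.1 - 1) (-1)).foldl
        (fun dp j =>
          let p := PySem.List.pyGetD dp (j - it.2.1) (0, 0)
          PySem.List.pySetD dp j
            (pvMaxP (PySem.List.pyGetD dp j (0, 0)) (p.1 + it.1, p.2 - it.2.2)))
        dp.toList := by
  have hmem : ∀ j ∈ PySem.List.pyRange target (it.2.1 - 1) (-1), it.2.1 ≤ j := by
    intro j hj
    have := (PySem.List.mem_pyRange_neg_one).mp hj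
    omega
  generalize hl : PySem.List.pyRange target (it.2.1 - 1) (-1) = l
  rw [hl] at hmem
  clear hl
  induction l with
  | nil => intro dp; rfl
  | cons x xs ih =>
    intro dp
    have hx : it.2.1 ≤ x := hmem x List.mem_cons_self
    rw [List.foldl_cons, List.foldl_cons,
        ih (fun j hj => hmem j (List.mem_cons_of_mem _ hj))]
    simp only []
    congr 1
    rw [Array.toList_setIfInBounds, PySem.List.pySetD_of_nonneg _ _ (by omega),
        pvArrGet dp (x - it.2.1) _ (by omega), pvArrGet dp x _ (by omega)]

-- A's table-building fold is the scanl of its row step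
theorem pvTab_scanl {β : Type} (g : β → (Int × Int × Int) → β) (d : β)
    (tail : List (Int × Int × Int)) (tab : List β) (r : β) :
    tail.foldl (fun tab item => tab ++ [g (tab.getLastD d) item]) (tab ++ [r]) =
      tab ++ List.scanl g r tail := by
  induction tail generalizing tab r with
  | nil => simp [List.scanl]
  | cons it its ih =>
    rw [List.foldl_cons, List.getLastD_concat, List.append_assoc]
    have := ih (tab := tab ++ [r]) (r := g r it)
    simpa [List.scanl_cons] using this

def pvRowP (items : List (Int × Int × Int)) (target : Int) (i : Nat) : List (Int × Int) :=
  (items.take i).foldl (fun r it => pvRowA r target it)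
    (List.replicate (target + 1).toNat ((0 : Int), (0 : Int)))

def pvRowPArr (items : List (Int × Int × Int)) (target : Int) (i : Nat) : Array (Int × Int) :=
  (items.take i).foldl (fun r it => pvRowAArr r target it)
    (Array.replicate (target + 1).toNat ((0 : Int), (0 : Int)))

theorem pvRowPArr_toList (items : List (Int × Int × Int)) (target : Int) (i : Nat) :
    (pvRowPArr items target i).toList = pvRowP items target i := by
  unfold pvRowPArr pvRowP
  rw [pvFoldRows_toList, Array.toList_replicate]

theorem pvTabGet (items : List (Int × Int × Int)) (target : Int) (n : Nat)
    (h : n ≤ items.length) :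
    PySem.List.pyGetD
      (List.scanl (fun row it => pvRowAArr row target it)
        (Array.replicate (target + 1).toNat ((0 : Int), (0 : Int))) items) (n : Int) #[] =
      pvRowPArr items target n := by
  rw [PySem.List.pyGetD_natCast, List.getD_eq_getElem?_getD, scanl_getElem? _ _ _ _ h]
  rfl

theorem pvRowP_succ (items : List (Int × Int × Int)) (target : Int) (i : Nat)
    (h : i < items.length) :
    pvRowP items target (i + 1) = pvRowA (pvRowP items target i) target items[i] := by
  unfold pvRowP
  rw [List.take_add_one, List.getElem?_eq_getElem h, Option.toList_some, List.foldl_append,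
      List.foldl_cons, List.foldl_nil]

theorem pvSumSnoc (l : List (Int × Int × Int)) (x : Int × Int × Int) (f : Int × Int × Int → Int) :
    (((l ++ [x]).map f).foldl (· + ·) 0) = ((l.map f).foldl (· + ·) 0) + f x := by
  simp [List.foldl_append]

theorem pvGetRepl (n : Nat) (j : Int) :
    PySem.List.pyGetD (List.replicate n ((0 : Int), (0 : Int))) j (0, 0) = (0, 0) := by
  rcases h : PySem.List.pyGet? (List.replicate n ((0 : Int), (0 : Int))) j with _ | x
  · exact PySem.List.pyGetD_of_none _ _ _ h
  · have hx := PySem.List.mem_of_pyGet?_eq_some _ h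
    rw [List.eq_of_mem_replicate hx] at h
    simp [PySem.List.pyGetD, h]

theorem pvBack (items : List (Int × Int × Int)) (target : Int)
    (hc : ∀ it ∈ items, 0 ≤ it.2.1) :
    ∀ (i : Nat), i ≤ items.length →
    ∀ (best : List (Int × Int × Int)) (j : Int), 0 ≤ j → j ≤ target →
    ((best.map (·.1)).foldl (· + ·) 0 + (PySem.List.pyGetD (pvRowP items target i) j (0, 0)).1 =
      (PySem.List.pyGetD (pvRow items target) target (0, 0)).1) →
    (-((best.map (·.2.2)).foldl (· + ·) 0) + (PySem.List.pyGetD (pvRowP items target i) j (0, 0)).2 =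
      (PySem.List.pyGetD (pvRow items target) target (0, 0)).2) →
    ((((PySem.List.pyRange (i : Int) 0 (-1)).foldl
        (fun (st : List (Int × Int × Int) × Int) i =>
          if (PySem.List.pyGetD
                (List.scanl (fun row it => pvRowAArr row target it)
                  (Array.replicate (target + 1).toNat ((0 : Int), (0 : Int))) items) i #[]).getD
                st.2.toNat (0, 0) ≠
              (PySem.List.pyGetD
                (List.scanl (fun row it => pvRowAArr row target it)
                  (Array.replicate (target + 1).toNat ((0 : Int), (0 : Int))) items) (i - 1) #[]).getD
                st.2.toNat (0, 0) then
            (st.1 ++ [PySem.List.pyGetD items (i - 1) (0, 0, 0)],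
             st.2 - (PySem.List.pyGetD items (i - 1) (0, 0, 0)).2.1)
          else st)
        (best, j)).1.map (·.1)).foldl (· + ·) 0 =
      (PySem.List.pyGetD (pvRow items target) target (0, 0)).1) ∧
    ((((PySem.List.pyRange (i : Int) 0 (-1)).foldl
        (fun (st : List (Int × Int × Int) × Int) i =>
          if (PySem.List.pyGetD
                (List.scanl (fun row it => pvRowAArr row target it)
                  (Array.replicate (target + 1).toNat ((0 : Int), (0 : Int))) items) i #[]).getD
                st.2.toNat (0, 0) ≠
              (PySem.List.pyGetD
                (List.scanl (fun row it => pvRowAArr row target it)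
                  (Array.replicate (target + 1).toNat ((0 : Int), (0 : Int))) items) (i - 1) #[]).getD
                st.2.toNat (0, 0) then
            (st.1 ++ [PySem.List.pyGetD items (i - 1) (0, 0, 0)],
             st.2 - (PySem.List.pyGetD items (i - 1) (0, 0, 0)).2.1)
          else st)
        (best, j)).1.map (·.2.2)).foldl (· + ·) 0 =
      -(PySem.List.pyGetD (pvRow items target) target (0, 0)).2) := by
  intro i
  induction i with
  | zero =>
    intro _ best j hj0 hjt hq hm
    rw [show ((0 : Nat) : Int) = 0 by rfl, PySem.List.pyRange_neg_one_eq_nil le_rfl,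
        List.foldl_nil]
    unfold pvRowP at hq hm
    simp only [List.take_zero, List.foldl_nil, pvGetRepl] at hq hm
    refine ⟨by simpa using hq, ?_⟩
    show ((best.map (·.2.2)).foldl (· + ·) 0) =
      -(PySem.List.pyGetD (pvRow items target) target (0, 0)).2
    omega
  | succ i ih =>
    intro hi best j hj0 hjt hq hm
    have hilt : i < items.length := hi
    rw [PySem.List.pyRange_neg_one_cons (by positivity), List.foldl_cons]
    rw [show ((i + 1 : Nat) : Int) - 1 = (i : Int) by push_cast; ring]
    rw [pvTabGet items target (i + 1) hi, pvTabGet items target i (le_of_lt hilt)]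
    have hconv1 : (pvRowPArr items target (i + 1)).getD ((best, j).2).toNat (0, 0) =
        PySem.List.pyGetD (pvRowP items target (i + 1)) j (0, 0) := by
      show (pvRowPArr items target (i + 1)).getD j.toNat (0, 0) = _
      rw [pvArrGet _ j _ hj0, pvRowPArr_toList]
    have hconv2 : (pvRowPArr items target i).getD ((best, j).2).toNat (0, 0) =
        PySem.List.pyGetD (pvRowP items target i) j (0, 0) := by
      show (pvRowPArr items target i).getD j.toNat (0, 0) = _
      rw [pvArrGet _ j _ hj0, pvRowPArr_toList]
    rw [hconv1, hconv2]
    by_cases hne : PySem.List.pyGetD (pvRowP items target (i + 1)) j (0, 0) ≠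
        PySem.List.pyGetD (pvRowP items target i) j (0, 0)
    · rw [if_pos hne]
      simp only []
      have hit : PySem.List.pyGetD items (i : Int) (0, 0, 0) = items[i] := by
        rw [PySem.List.pyGetD_natCast, List.getD_eq_getElem?_getD,
            List.getElem?_eq_getElem hilt]
        rfl
      rw [hit]
      have hcost : 0 ≤ items[i].2.1 := hc items[i] (List.getElem_mem hilt)
      have hcur := pvRowA_get (pvRowP items target i) target items[i] j hj0 (by omega)
      rw [← pvRowP_succ items target i hilt] at hcur
      have hcle : items[i].2.1 ≤ j := by
        by_contra hgt
        rw [if_neg hgt] at hcur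
        exact hne hcur
      rw [if_pos hcle] at hcur
      have hval : PySem.List.pyGetD (pvRowP items target (i + 1)) j (0, 0) =
          ((PySem.List.pyGetD (pvRowP items target i) (j - items[i].2.1) (0, 0)).1 + items[i].1,
           (PySem.List.pyGetD (pvRowP items target i) (j - items[i].2.1) (0, 0)).2 - items[i].2.2) := by
        rw [hcur]
        unfold pvMaxP
        split_ifs with hlt
        · rfl
        · exfalso
          apply hne
          rw [hcur]
          unfold pvMaxP
          rw [if_neg hlt]
      refine ih (le_of_lt hilt) (best ++ [items[i]]) (j - items[i].2.1)
        (by omega) (by omega) ?_ ?_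
      · rw [pvSumSnoc]
        rw [hval] at hq
        simp only [] at hq ⊢
        omega
      · rw [pvSumSnoc]
        rw [hval] at hm
        simp only [] at hm ⊢
        omega
    · rw [if_neg hne]
      rw [not_ne_iff.mp hne] at hq hm
      exact ih (le_of_lt hilt) best j hj0 hjt hq hm

theorem solve_alt_eq (items : List (Int × Int × Int)) (target : Int)
    (ht : 0 ≤ target) (hc : ∀ it ∈ items, 0 ≤ it.2.1) :
    solve_alt items target =
      (PySem.List.pyGetD (pvRow items target) target (0, 0)).1 *
        -(PySem.List.pyGetD (pvRow items target) target (0, 0)).2 := by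
  simp only [solve_alt]
  have hdp : (items.foldl
      (fun dp item =>
        (PySem.List.pyRange target (item.2.1 - 1) (-1)).foldl
          (fun (dp : Array (Int × Int)) j =>
            let p := dp.getD (j - item.2.1).toNat (0, 0)
            dp.setIfInBounds j.toNat
              (pvMaxP (dp.getD j.toNat (0, 0)) (p.1 + item.1, p.2 - item.2.2)))
          dp)
      (Array.replicate (target + 1).toNat ((0 : Int), (0 : Int)))).toList =
      pvRow items target := by
    have hbridge : ∀ (l : List (Int × Int × Int)), (∀ it ∈ l, 0 ≤ it.2.1) →
        ∀ arr : Array (Int × Int),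
        (l.foldl
          (fun dp item =>
            (PySem.List.pyRange target (item.2.1 - 1) (-1)).foldl
              (fun (dp : Array (Int × Int)) j =>
                let p := dp.getD (j - item.2.1).toNat (0, 0)
                dp.setIfInBounds j.toNat
                  (pvMaxP (dp.getD j.toNat (0, 0)) (p.1 + item.1, p.2 - item.2.2)))
              dp)
          arr).toList =
        l.foldl
          (fun dp item =>
            (PySem.List.pyRange target (item.2.1 - 1) (-1)).foldl
              (fun dp j =>
                let p := PySem.List.pyGetD dp (j - item.2.1) (0, 0)
                PySem.List.pySetD dp j
                  (pvMaxP (PySem.List.pyGetD dp j (0, 0)) (p.1 + item.1, p.2 - item.2.2)))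
              dp)
          arr.toList := by
      intro l
      induction l with
      | nil => intro _ arr; rfl
      | cons it its ih =>
        intro hcl arr
        rw [List.foldl_cons, List.foldl_cons,
            ih (fun x hx => hcl x (List.mem_cons_of_mem _ hx)),
            pvSweepArr_toList target it (hcl it List.mem_cons_self)]
    rw [hbridge items hc, Array.toList_replicate,
        pvFold_sweep target ht items _ hc (by simp)]
    rfl
  rw [pvArrGet _ target _ ht, hdp]

theorem solve_spec' (items : List (Int × Int × Int)) (target : Int)
    (ht : 0 ≤ target) (hc : ∀ it ∈ items, 0 ≤ it.2.1) :
    solve items target = solve_alt items target := by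
  have htab : (List.foldl (fun tab item => tab ++ [pvRowAArr (tab.getLastD #[]) target item])
      [Array.replicate (target + 1).toNat ((0 : Int), (0 : Int))] items)
      = List.scanl (fun row it => pvRowAArr row target it)
          (Array.replicate (target + 1).toNat ((0 : Int), (0 : Int))) items := by
    simpa using pvTab_scanl (fun row it => pvRowAArr row target it) #[] items []
      (Array.replicate (target + 1).toNat ((0 : Int), (0 : Int)))
  have hP : pvRowP items target items.length = pvRow items target := by
    unfold pvRowP pvRow
    rw [List.take_length]
  obtain ⟨hq, hm⟩ := pvBack items target hc items.length le_rfl [] target ht le_rfl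
    (by rw [hP]; simp) (by rw [hP]; simp)
  simp only [solve, htab]
  rw [hq, hm, solve_alt_eq items target ht hc]

-- ===== VERDICT (by name: the statement is the Claim_ definition above) =====
theorem solve_spec : Claim_equal_solve := by
  intro items target _ hpre
  unfold Spec_solve
  exact solve_spec' items target hpre.1 hpre.2
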